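-- pv_equiv track=rewrite | github.com/HuyVo-11/COS30018-HNRS-OptionB | src/segmentation/expression_parser.py | clean_characters
-- ===== SOURCE A (Python) =====
-- def clean_characters(raw_chars):
--     chars = [char.strip() for char in raw_chars if char.strip() != ""]
--
--     operators = {"+", "-", "*", "/", "÷"}
--     cleaned = []
--     for char in chars:
--         if cleaned and char in operators and cleaned[-1] == char:
--             continue
--         cleaned.append(char)
--
--     return cleaned
-- ===== SOURCE B (Python) =====
-- from itertools import groupby
--
--
-- def clean_characters(raw_chars):
--     chars = [char.strip() for char in raw_chars if char.strip() != ""]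
--
--     operators = {"+", "-", "*", "/", "÷"}
--     cleaned = []
--     for key, group in groupby(chars):
--         if key in operators:
--             cleaned.append(key)
--         else:
--             cleaned.extend(group)
--     return cleaned
-- ===== Notes on version B (the rewrite author's own statement) =====
-- stated objective: idiomatic
-- what changed: Replaces the last-appended-element tracking loop with itertools.groupby over the stripped list: each run of equal characters is emitted once if it is an operator, in full otherwise.
import Mathlib
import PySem

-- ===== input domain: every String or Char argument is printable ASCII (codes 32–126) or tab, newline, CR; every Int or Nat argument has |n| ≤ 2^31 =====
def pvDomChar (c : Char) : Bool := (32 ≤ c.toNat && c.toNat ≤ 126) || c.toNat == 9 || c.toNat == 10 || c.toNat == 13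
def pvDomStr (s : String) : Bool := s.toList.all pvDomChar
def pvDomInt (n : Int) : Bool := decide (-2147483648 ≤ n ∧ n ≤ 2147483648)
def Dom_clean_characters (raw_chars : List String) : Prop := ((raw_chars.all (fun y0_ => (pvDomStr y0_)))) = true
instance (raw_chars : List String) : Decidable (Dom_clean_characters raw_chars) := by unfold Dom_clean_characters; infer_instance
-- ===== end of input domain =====

-- B replaces A's last-appended-element tracking with a run-grouping (itertools.groupby) pass: more idiomatic, same O(n) cost.


-- ===== PORT A =====
-- operators = {"+", "-", "*", "/", "÷"}
def pvOps : PySem.Set String := PySem.Set.ofList ["+", "-", "*", "/", "÷"]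

-- chars = [char.strip() for char in raw_chars if char.strip() != ""]
def pvStripped (raw_chars : List String) : List String :=
  (raw_chars.filter (fun c => PySem.Str.strip c ≠ "")).map (fun c => PySem.Str.strip c)

def clean_characters (raw_chars : List String) : List String :=
  let chars := pvStripped raw_chars
  (chars.foldl (fun cleaned char =>
      if cleaned ≠ [] ∧ PySem.Set.contains pvOps char = true ∧
          PySem.List.pyGet? cleaned (-1) = some char then
        cleaned
      else cleaned ++ [char]) [])

-- ===== PORT B =====
-- itertools.groupby: maximal runs of consecutive equal elements
def pvRuns : List String → List (String × List String)
  | [] => []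
  | c :: rest =>
      (c, rest.takeWhile (fun d => d == c)) :: pvRuns (rest.dropWhile (fun d => d == c))
  termination_by l => l.length
  decreasing_by
    exact Nat.lt_succ_of_le (List.length_dropWhile_le _ _)

def clean_characters_alt (raw_chars : List String) : List String :=
  let chars := pvStripped raw_chars
  (pvRuns chars).foldl (fun cleaned kg =>
      if PySem.Set.contains pvOps kg.1 = true then cleaned ++ [kg.1]
      else cleaned ++ (kg.1 :: kg.2)) []

-- ===== PRECONDITION & SPEC =====
def Spec_clean_characters (raw_chars : List String) (out : List String) : Prop := out = clean_characters_alt raw_chars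
instance (raw_chars : List String) (out : List String) : Decidable (Spec_clean_characters raw_chars out) := by unfold Spec_clean_characters; infer_instance

-- ===== CLAIM (what is proved, stated in full; the proofs are below) =====
def Claim_equal_clean_characters : Prop := ∀ (raw_chars : List String), Dom_clean_characters raw_chars → Spec_clean_characters raw_chars (clean_characters raw_chars)

-- ===== LEMMAS AND PROOFS =====

theorem pvRuns_nil : pvRuns [] = [] := by simp [pvRuns]

theorem pvRuns_cons (c : String) (rest : List String) :
    pvRuns (c :: rest) =
      (c, rest.takeWhile (fun d => d == c)) :: pvRuns (rest.dropWhile (fun d => d == c)) := by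
  rw [pvRuns]

-- common specification: the deduped list, written by straightforward front recursion
def pvSpecAux (last : String) : List String → List String
  | [] => []
  | c :: rest =>
      if PySem.Set.contains pvOps c = true ∧ c = last then pvSpecAux last rest
      else c :: pvSpecAux c rest

def pvSpec : List String → List String
  | [] => []
  | c :: rest => c :: pvSpecAux c rest

-- ---- A side ----
theorem pvA_step (chars : List String) :
    ∀ (acc : List String) (l : String), acc.getLast? = some l →
    (chars.foldl (fun cleaned char =>
      if cleaned ≠ [] ∧ PySem.Set.contains pvOps char = true ∧
          PySem.List.pyGet? cleaned (-1) = some char then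
        cleaned
      else cleaned ++ [char]) acc) = acc ++ pvSpecAux l chars := by
  induction chars with
  | nil => intro acc l h; simp [pvSpecAux]
  | cons c rest ih =>
    intro acc l h
    have hne : acc ≠ [] := by
      intro hnil; rw [hnil] at h; simp at h
    have hget : PySem.List.pyGet? acc (-1) = acc.getLast? := by
      rcases (List.exists_cons_of_ne_nil hne) with ⟨a, as, rfl⟩
      simp [PySem.List.pyGet?, PySem.List.pyIdx?, List.getLast?_eq_getElem?]
    by_cases hc : PySem.Set.contains pvOps c = true ∧ c = l
    · have : (if acc ≠ [] ∧ PySem.Set.contains pvOps c = true ∧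
          PySem.List.pyGet? acc (-1) = some c then acc else acc ++ [c]) = acc := by
        rw [if_pos ⟨hne, hc.1, by rw [hget, h, hc.2]⟩]
      simp only [List.foldl_cons, this]
      rw [ih acc l h]
      conv_rhs => rw [pvSpecAux, if_pos hc]
    · have hcond : ¬ (acc ≠ [] ∧ PySem.Set.contains pvOps c = true ∧
          PySem.List.pyGet? acc (-1) = some c) := by
        rintro ⟨-, hop, hlast⟩
        exact hc ⟨hop, by rw [hget, h] at hlast; exact (Option.some_inj.mp hlast).symm⟩
      simp only [List.foldl_cons, if_neg hcond]
      rw [ih (acc ++ [c]) c (by simp)]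
      conv_rhs => rw [pvSpecAux, if_neg hc]
      simp

theorem pvA_eq_spec (chars : List String) :
    (chars.foldl (fun cleaned char =>
      if cleaned ≠ [] ∧ PySem.Set.contains pvOps char = true ∧
          PySem.List.pyGet? cleaned (-1) = some char then
        cleaned
      else cleaned ++ [char]) []) = pvSpec chars := by
  cases chars with
  | nil => rfl
  | cons c rest =>
    rw [List.foldl_cons]
    have h1 : (if ([] : List String) ≠ [] ∧ PySem.Set.contains pvOps c = true ∧
        PySem.List.pyGet? [] (-1) = some c then ([] : List String) else [] ++ [c]) = [c] := by
      simp
    rw [h1, pvA_step rest [c] c (by simp), pvSpec]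
    rfl

-- ---- B side ----
theorem pvSpecAux_op (c : String) (hop : PySem.Set.contains pvOps c = true) :
    ∀ rest : List String,
    pvSpecAux c rest = pvSpecAux c (rest.dropWhile (fun d => d == c)) := by
  intro rest
  induction rest with
  | nil => rfl
  | cons d r ih =>
    by_cases hd : d = c
    · subst hd
      rw [List.dropWhile_cons_of_pos (by simp), pvSpecAux, if_pos ⟨hop, rfl⟩, ih]
    · rw [List.dropWhile_cons_of_neg (by simp [hd])]

theorem pvSpecAux_nonop (c : String) (hop : ¬ PySem.Set.contains pvOps c = true) :
    ∀ rest : List String,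
    pvSpecAux c rest =
      rest.takeWhile (fun d => d == c) ++ pvSpecAux c (rest.dropWhile (fun d => d == c)) := by
  intro rest
  induction rest with
  | nil => rfl
  | cons d r ih =>
    by_cases hd : d = c
    · subst hd
      rw [List.takeWhile_cons_of_pos (by simp), List.dropWhile_cons_of_pos (by simp),
        pvSpecAux, if_neg (by rintro ⟨h, -⟩; exact hop h), ih]
      rfl
    · rw [List.takeWhile_cons_of_neg (by simp [hd]), List.dropWhile_cons_of_neg (by simp [hd]),
        List.nil_append]

theorem pvSpecAux_head_ne (c : String) :
    ∀ rest : List String, (∀ d, rest.head? = some d → d ≠ c) →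
    pvSpecAux c rest = pvSpec rest := by
  intro rest h
  cases rest with
  | nil => rfl
  | cons d r =>
    rw [pvSpecAux, if_neg (by rintro ⟨-, rfl⟩; exact h d rfl rfl), pvSpec]

theorem pvB_eq_spec (n : ℕ) : ∀ (chars : List String), chars.length ≤ n → ∀ (acc : List String),
    ((pvRuns chars).foldl (fun cleaned kg =>
      if PySem.Set.contains pvOps kg.1 = true then cleaned ++ [kg.1]
      else cleaned ++ (kg.1 :: kg.2)) acc) = acc ++ pvSpec chars := by
  induction n with
  | zero =>
    intro chars h acc
    have : chars = [] := List.eq_nil_of_length_eq_zero (Nat.le_zero.mp h)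
    subst this; simp [pvRuns_nil, pvSpec]
  | succ n ih =>
    intro chars h acc
    cases chars with
    | nil => simp [pvRuns_nil, pvSpec]
    | cons c rest =>
      rw [pvRuns_cons]
      set rest' := rest.dropWhile (fun d => d == c) with hrest'
      have hlen : rest'.length ≤ n := by
        have := List.length_dropWhile_le (fun d => d == c) rest
        rw [← hrest'] at this
        simp only [List.length_cons] at h
        omega
      have hhead : ∀ d, rest'.head? = some d → d ≠ c := by
        intro d hd
        have := List.head?_dropWhile_not (fun d => d == c) rest
        rw [← hrest', hd] at this
        simpa using this
      simp only [List.foldl_cons]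
      by_cases hop : PySem.Set.contains pvOps c = true
      · rw [if_pos hop, ih rest' hlen (acc ++ [c]), pvSpec,
          pvSpecAux_op c hop rest, pvSpecAux_head_ne c rest' hhead]
        simp
      · rw [if_neg hop, ih rest' hlen (acc ++ (c :: rest.takeWhile (fun d => d == c))), pvSpec,
          pvSpecAux_nonop c hop rest, pvSpecAux_head_ne c rest' hhead]
        simp
-- ===== VERDICT (by name: the statement is the Claim_ definition above) =====
theorem clean_characters_spec : Claim_equal_clean_characters := by
  intro raw_chars _
  unfold Spec_clean_characters clean_characters clean_characters_alt
  rw [pvA_eq_spec, pvB_eq_spec (pvStripped raw_chars).length _ le_rfl []]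
  simp
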